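-- pv_equiv track=rewrite | github.com/ericstevensjr/aiproject3 | logic.py | generateEncodedObjects
-- ===== SOURCE A (Python) =====
-- import itertools
--
-- def generateEncodedObjects(attributes):
--     # Generate all possible combinations of attribute values
--     values_combinations = list(itertools.product(*attributes.values()))
--     encoded_objects = []
--
--     for combination in values_combinations:
--         encoded = ''.join('1' if value == attributes[attribute][0] else '0'
--                           for attribute, value in zip(attributes.keys(), combination))
--         encoded_objects.append(encoded)
--
--     return encoded_objects
-- ===== SOURCE B (Python) =====
-- def generateEncodedObjects(attributes):
--     # Iterative prefix extension: start from one empty code and, for each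
--     # attribute in order, extend every prefix with '1'/'0' per value.
--     out = ['']
--     for values in attributes.values():
--         first = values[0] if values else None
--         out = [prefix + ('1' if v == first else '0')
--                for prefix in out for v in values]
--     return out
-- ===== Notes on version B (the rewrite author's own statement) =====
-- stated objective: alternative
-- what changed: Replaces the itertools.product enumeration plus per-combination join/dict-lookup with an iterative accumulator: starting from one empty code, each attribute pass extends every existing prefix by one '1'/'0' character, so no Cartesian-product tuples or joins are ever built.
import Mathlib
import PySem

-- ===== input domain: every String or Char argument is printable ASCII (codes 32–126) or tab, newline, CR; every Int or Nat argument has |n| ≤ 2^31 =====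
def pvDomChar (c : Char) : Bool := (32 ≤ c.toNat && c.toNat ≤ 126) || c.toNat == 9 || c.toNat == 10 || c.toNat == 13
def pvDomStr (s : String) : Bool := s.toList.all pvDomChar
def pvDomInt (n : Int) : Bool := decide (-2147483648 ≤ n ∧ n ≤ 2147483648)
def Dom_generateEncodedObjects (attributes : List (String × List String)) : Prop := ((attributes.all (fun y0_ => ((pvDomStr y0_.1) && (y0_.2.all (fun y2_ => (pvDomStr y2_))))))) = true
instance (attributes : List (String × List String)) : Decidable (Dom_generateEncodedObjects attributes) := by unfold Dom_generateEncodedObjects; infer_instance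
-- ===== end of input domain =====

-- B replaces the Cartesian-product enumeration + per-combination join/dict-lookup
-- with an iterative accumulator that extends every pfx by one character per
-- attribute pass. Objective: alternative (no product tuples, no joins, no lookups).

-- ===== PORT A =====
-- itertools.product over a list of lists (same combination order as Python).
def pvProduct {α : Type} : List (List α) → List (List α)
  | [] => [[]]
  | l :: ls => l.flatMap (fun x => (pvProduct ls).map (fun c => x :: c))

-- dict first-match lookup attributes[attribute] (keys are unique under Pre_).
def pvLookup (d : List (String × List String)) (k : String) : List String :=
  match d with
  | [] => []
  | (k', vs) :: t => if k' == k then vs else pvLookup t k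

def generateEncodedObjects (attributes : List (String × List String)) : List String :=
  let values_combinations := pvProduct (attributes.map Prod.snd)
  values_combinations.map (fun combination =>
    String.mk (((attributes.map Prod.fst).zip combination).map
      (fun p => if p.2 == (pvLookup attributes p.1).headD "" then '1' else '0')))

-- ===== PORT B =====
-- The growing pfx strings are represented by their character lists
-- (String.mk is applied once at the end — exact for string concatenation).
-- 'first = values[0] if values else None' is a.2.headD ""; on an empty value
-- list no extension happens, so the default is never compared.
def generateEncodedObjects_alt (attributes : List (String × List String)) : List String :=
  (attributes.foldl
    (fun out a =>
      out.flatMap (fun pfx =>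
        a.2.map (fun v => pfx ++ [if v == a.2.headD "" then '1' else '0'])))
    [[]]).map String.mk

-- ===== PRECONDITION & SPEC =====
-- Pre_ excludes association lists with duplicate keys: a Python dict cannot
-- contain duplicate keys, so such inputs do not correspond to any call of A.
def Pre_generateEncodedObjects (attributes : List (String × List String)) : Prop :=
  (attributes.map Prod.fst).Nodup

instance (attributes : List (String × List String)) : Decidable (Pre_generateEncodedObjects attributes) := by unfold Pre_generateEncodedObjects; infer_instance

def pvWitness_generateEncodedObjects : (List (String × List String)) :=
  [("color", ["red", "blue"]), ("size", ["s", "m", "l"])]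

def Spec_generateEncodedObjects (attributes : List (String × List String)) (out : List String) : Prop := out = generateEncodedObjects_alt attributes
instance (attributes : List (String × List String)) (out : List String) : Decidable (Spec_generateEncodedObjects attributes out) := by unfold Spec_generateEncodedObjects; infer_instance

-- ===== CLAIM (what is proved, stated in full; the proofs are below) =====
def Claim_equal_generateEncodedObjects : Prop := ∀ (attributes : List (String × List String)), Dom_generateEncodedObjects attributes → Pre_generateEncodedObjects attributes → Spec_generateEncodedObjects attributes (generateEncodedObjects attributes)

-- ===== LEMMAS AND PROOFS =====

-- The '1'/'0' encoding of one attribute's value list.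
def pvEnc (l : List String) : List Char :=
  l.map (fun v => if v == l.headD "" then '1' else '0')

-- A's encoding of each product combination is the product of the encoded lists.
theorem pv_core (d : List (String × List String))
    (hnd : (d.map Prod.fst).Nodup) :
    (pvProduct (d.map Prod.snd)).map (fun c =>
        ((d.map Prod.fst).zip c).map
          (fun p => if p.2 == (pvLookup d p.1).headD "" then '1' else '0'))
      = pvProduct (d.map (fun a => pvEnc a.2)) := by
  induction d with
  | nil => simp [pvProduct]
  | cons a t ih =>
    obtain ⟨k, vs⟩ := a
    simp only [List.map_cons, List.nodup_cons] at hnd ⊢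
    obtain ⟨hk, hnt⟩ := hnd
    show (pvProduct (vs :: t.map Prod.snd)).map _
        = pvProduct (pvEnc vs :: t.map (fun a => pvEnc a.2))
    simp only [pvProduct, List.map_flatMap, List.map_map]
    rw [← ih hnt]
    cases vs with
    | nil => simp [pvEnc]
    | cons v0 vt =>
      simp only [pvEnc, List.headD, List.flatMap_map]
      apply List.flatMap_congr
      intro v hv
      simp only [List.map_map]
      apply List.map_congr_left
      intro c hc
      simp only [Function.comp_apply, List.zip_cons_cons, List.map_cons, List.cons.injEq]
      constructor
      · simp [pvLookup]
      · apply List.map_congr_left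
        intro p hp
        have hp1 : p.1 ∈ t.map Prod.fst := (List.of_mem_zip hp).1
        have hne : ¬ (k == p.1) := by
          simp only [beq_iff_eq]
          rintro rfl; exact hk hp1
        simp [pvLookup, hne]

-- B's accumulator loop: folding the extension step over the attributes appends
-- every product combination of the encoded lists to every accumulated pfx.
theorem pv_ext (d : List (String × List String)) (acc : List (List Char)) :
    d.foldl
      (fun out a =>
        out.flatMap (fun pfx =>
          a.2.map (fun v => pfx ++ [if v == a.2.headD "" then '1' else '0'])))
      acc
    = acc.flatMap (fun p =>
        (pvProduct (d.map (fun a => pvEnc a.2))).map (fun c => p ++ c)) := by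
  induction d generalizing acc with
  | nil => simp [pvProduct]
  | cons a t ih =>
    simp only [List.foldl_cons, ih, List.map_cons]
    show _ = acc.flatMap (fun p =>
        (pvProduct (pvEnc a.2 :: t.map (fun a => pvEnc a.2))).map (fun c => p ++ c))
    simp only [pvProduct, List.map_flatMap, List.flatMap_assoc, pvEnc, List.flatMap_map,
      List.map_map]
    apply List.flatMap_congr
    intro p hp
    apply List.flatMap_congr
    intro v hv
    apply List.map_congr_left
    intro c hc
    simp

theorem generateEncodedObjects_spec_aux (attributes : List (String × List String))
    (hpre : Pre_generateEncodedObjects attributes) :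
    generateEncodedObjects attributes = generateEncodedObjects_alt attributes := by
  unfold generateEncodedObjects generateEncodedObjects_alt
  simp only []
  rw [pv_ext attributes [[]], ← pv_core attributes hpre]
  simp [Function.comp]

-- ===== VERDICT (by name: the statement is the Claim_ definition above) =====
theorem generateEncodedObjects_spec : Claim_equal_generateEncodedObjects := by
  intro attributes _ hpre
  exact generateEncodedObjects_spec_aux attributes hpre
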